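-- pv_equiv track=rewrite | github.com/albertionut11/unichess | uni_chess/games/views.py | RoundRobinGeneration
-- ===== SOURCE A (Python) =====
-- def RoundRobinGeneration(players):
--     n = len(players)
--     rounds = []
--     if n % 2 == 1:
--         n += 1
--         players.append(None)
--     for round_num in range(n - 1):
--         round_matches = []
--         for i in range(n // 2):
--             player1 = players[i]
--             player2 = players[n - i - 1]
--             if player1 is not None and player2 is not None:
--                 round_matches.append((player1, player2))
--         players.insert(1, players.pop())
--         rounds.append(round_matches)
--     return rounds
-- ===== SOURCE B (Python) =====
-- def RoundRobinGeneration(players):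
--     # Circle method via modular index arithmetic; no mutable rotation.
--     # Mutates `players` like A does when the count is odd (appends None).
--     if len(players) % 2 == 1:
--         players.append(None)
--     n = len(players)
--     m = n - 1
--     rounds = []
--     for r in range(m):
--         matches = []
--         for i in range(n // 2):
--             p1 = players[0] if i == 0 else players[1 + (i - 1 - r) % m]
--             p2 = players[1 + (n - i - 2 - r) % m]
--             if p1 is not None and p2 is not None:
--                 matches.append((p1, p2))
--         rounds.append(matches)
--     return rounds
-- ===== Notes on version B (the rewrite author's own statement) =====
-- stated objective: alternative
-- what changed: Replaces A's mutable rotating list (pop last / insert at 1 each round) by the circle method computed with modular index arithmetic: each pairing is read directly from the unrotated list via (i-1-r) % (n-1) index formulas, so no rotation state is maintained.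
import Mathlib
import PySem

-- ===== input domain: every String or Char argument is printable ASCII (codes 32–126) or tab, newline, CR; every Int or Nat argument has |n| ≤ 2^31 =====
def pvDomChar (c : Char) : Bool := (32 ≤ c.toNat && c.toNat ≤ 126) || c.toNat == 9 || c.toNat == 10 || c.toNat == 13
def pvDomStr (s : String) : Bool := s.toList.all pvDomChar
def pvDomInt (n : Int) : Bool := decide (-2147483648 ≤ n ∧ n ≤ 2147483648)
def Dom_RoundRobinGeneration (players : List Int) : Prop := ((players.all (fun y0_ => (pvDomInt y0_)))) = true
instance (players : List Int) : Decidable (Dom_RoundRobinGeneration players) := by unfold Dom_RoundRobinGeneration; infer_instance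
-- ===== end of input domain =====

-- B replaces A's mutable rotation by modular index arithmetic (circle method); equal return values.
-- A mutates its argument (appends None when odd, rotates in place); the equivalence proved is about the RETURN value only.

-- ===== PORT A =====
-- Python None-padding is modelled with Option Int: `some` = a player, `none` = the padding None.
-- players.insert(1, players.pop()): pop() = (getLast?, dropLast) — exact, since the loop body only
-- runs when n ≥ 2, so the list is nonempty (Python's pop would raise only on an empty list, unreachable).
def rrStep (ps : List (Option Int)) : List (Option Int) :=
  match ps.getLast? with
  | none => ps
  | some x => PySem.List.insert ps.dropLast 1 x

-- one round: for i in range(n // 2), players[i] / players[n-i-1] — always in bounds in Python, so getD is exact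
def rrRound (n : Nat) (ps : List (Option Int)) : List (Int × Int) :=
  (List.range (n / 2)).foldl (fun acc i =>
    match ps.getD i none, ps.getD (n - i - 1) none with
    | some p1, some p2 => acc ++ [(p1, p2)]
    | _, _ => acc) []

-- for round_num in range(n - 1): the loop variable is unused in A's body
def rrLoop : Nat → Nat → List (Option Int) → List (List (Int × Int))
  | 0, _, _ => []
  | m + 1, n, ps => rrRound n ps :: rrLoop m n (rrStep ps)

def RoundRobinGeneration (players : List Int) : List (List (Int × Int)) :=
  let ps := if players.length % 2 == 1 then players.map some ++ [none] else players.map some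
  rrLoop (ps.length - 1) ps.length ps

-- ===== PORT B =====
-- Python's % with positive divisor is Int's % (emod) — exact; all indices are in range, so getD is exact.
def altRound (n : Nat) (ps : List (Option Int)) (r : Nat) : List (Int × Int) :=
  (List.range (n / 2)).filterMap (fun (i : Nat) =>
    match (if i = 0 then ps.getD 0 none
           else ps.getD (1 + ((((i : Int) - 1 - (r : Int)) % ((n : Int) - 1)).toNat) ) none),
          ps.getD (1 + ((((n : Int) - (i : Int) - 2 - (r : Int)) % ((n : Int) - 1)).toNat)) none with
    | some a, some b => some (a, b)
    | _, _ => none)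

def RoundRobinGeneration_alt (players : List Int) : List (List (Int × Int)) :=
  let ps := if players.length % 2 == 1 then players.map some ++ [none] else players.map some
  (List.range (ps.length - 1)).map (altRound ps.length ps)

-- ===== PRECONDITION & SPEC =====
def Spec_RoundRobinGeneration (players : List Int) (out : List (List (Int × Int))) : Prop := out = RoundRobinGeneration_alt players
instance (players : List Int) (out : List (List (Int × Int))) : Decidable (Spec_RoundRobinGeneration players out) := by unfold Spec_RoundRobinGeneration; infer_instance

-- ===== CLAIM (what is proved, stated in full; the proofs are below) =====
def Claim_equal_RoundRobinGeneration : Prop := ∀ (players : List Int), Dom_RoundRobinGeneration players → Spec_RoundRobinGeneration players (RoundRobinGeneration players)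

-- ===== LEMMAS AND PROOFS =====

-- arithmetic core: Nat rotation offset vs Python's signed modulus
theorem rr_idx_eq (l t r : Nat) (hl : 0 < l) :
    (((t : Int) - (r : Int)) % (l : Int)).toNat = (t + r * (l - 1)) % l := by
  have hcast : ((t + r * (l - 1) : Nat) : Int) = (t : Int) - r + l * r := by
    have h1 : ((l - 1 : Nat) : Int) = (l : Int) - 1 := by omega
    push_cast [h1]; ring
  have h2 : ((t : Int) - (r : Int)) % (l : Int) = ((t + r * (l - 1) : Nat) : Int) % ((l : Nat) : Int) := by
    rw [hcast, Int.add_mul_emod_self_left]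
  have h3 : ((t + r * (l - 1) : Nat) : Int) % ((l : Nat) : Int) = (((t + r * (l - 1)) % l : Nat) : Int) :=
    (Int.natCast_mod _ _).symm
  rw [h2, h3, Int.toNat_natCast]

-- foldl-append over the two lookups = filterMap (A's inner loop as a filterMap)
theorem rr_foldl_filterMap (xs : List Nat) (ps : List (Option Int)) (n : Nat) (init : List (Int × Int)) :
    xs.foldl (fun acc i =>
      match ps.getD i none, ps.getD (n - i - 1) none with
      | some p1, some p2 => acc ++ [(p1, p2)]
      | _, _ => acc) init
    = init ++ xs.filterMap (fun i =>
      match ps.getD i none, ps.getD (n - i - 1) none with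
      | some p1, some p2 => some (p1, p2)
      | _, _ => none) := by
  induction xs generalizing init with
  | nil => simp
  | cons x xs ih =>
    cases hf : ps.getD x none <;> cases hg : ps.getD (n - x - 1) none <;>
      simp only [List.foldl_cons, List.filterMap_cons, hf, hg] <;> rw [ih] <;> simp

theorem rr_filterMap_congr {α β : Type} (xs : List α) (f g : α → Option β)
    (h : ∀ a ∈ xs, f a = g a) : xs.filterMap f = xs.filterMap g := by
  induction xs with
  | nil => rfl
  | cons x xs ih =>
    simp only [List.filterMap_cons, h x (List.mem_cons_self),
      ih (fun a ha => h a (List.mem_cons_of_mem _ ha))]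

-- the rotation step on a nonempty tail
theorem rr_step_rotate (a : Option Int) (zs : List (Option Int)) (hz : zs ≠ []) :
    rrStep (a :: zs) = a :: zs.rotate (zs.length - 1) := by
  obtain ⟨ys, x, rfl⟩ := List.eq_nil_or_concat zs |>.resolve_left hz
  simp only [List.concat_eq_append]
  have h1 : (a :: (ys ++ [x])).getLast? = some x := by
    rw [show a :: (ys ++ [x]) = (a :: ys) ++ [x] by simp, List.getLast?_concat]
  have h2 : (a :: (ys ++ [x])).dropLast = a :: ys := by
    rw [show a :: (ys ++ [x]) = (a :: ys) ++ [x] by simp, List.dropLast_concat]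
  have h3 : (ys ++ [x]).rotate ((ys ++ [x]).length - 1) = x :: ys := by
    have hlen : (ys ++ [x]).length - 1 = ys.length := by simp
    rw [hlen, List.rotate_eq_drop_append_take (by simp)]
    simp
  have h4 : PySem.List.insert (a :: ys) 1 x = a :: x :: ys := by
    rw [PySem.List.insert_ofNat (a :: ys) 1 x (by simp)]
    simp
  rw [rrStep, h1, h2, h3]
  exact h4

-- rotated-state access = B's modular formula, per round
theorem rr_round_eq (n r : Nat) (a : Option Int) (rest : List (Option Int))
    (hn : rest.length = n - 1) (hpos : 0 < rest.length) :
    rrRound n (a :: rest.rotate (r * (n - 2))) = altRound n (a :: rest) r := by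
  have hn2 : 2 ≤ n := by omega
  rw [rrRound, altRound, rr_foldl_filterMap, List.nil_append]
  apply rr_filterMap_congr
  intro i hi
  have hi2 : i < n / 2 := List.mem_range.mp hi
  -- key: tail access after r rotations = modular lookup in the original tail
  have key : ∀ t : Nat, t < rest.length →
      (rest.rotate (r * (n - 2))).getD t none
        = rest.getD ((((t : Int) - (r : Int)) % ((n : Int) - 1)).toNat) none := by
    intro t ht
    have hlcast : ((n : Int) - 1) = ((rest.length : Nat) : Int) := by omega
    rw [hlcast, rr_idx_eq rest.length t r (by omega)]
    have hrl : rest.length - 1 = n - 2 := by omega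
    rw [hrl]
    have ht1 : t < (rest.rotate (r * (n - 2))).length := by rw [List.length_rotate]; omega
    rw [List.getD_eq_getElem _ _ ht1,
      List.getD_eq_getElem _ _ (Nat.mod_lt _ (by omega : 0 < rest.length)),
      List.getElem_rotate]
  -- player1
  have hp1 : (a :: rest.rotate (r * (n - 2))).getD i none
      = (if i = 0 then (a :: rest).getD 0 none
         else (a :: rest).getD (1 + ((((i : Int) - 1 - (r : Int)) % ((n : Int) - 1)).toNat)) none) := by
    cases i with
    | zero => simp
    | succ j =>
      rw [if_neg (Nat.succ_ne_zero j)]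
      simp only [List.getD_cons_succ]
      have hj : j < rest.length := by omega
      rw [Nat.add_comm 1 _]
      simp only [List.getD_cons_succ]
      have harg : (((j + 1 : Nat) : Int) - 1 - (r : Int)) = ((j : Int) - (r : Int)) := by
        push_cast; ring
      rw [harg, key j hj]
  -- player2
  have hp2 : (a :: rest.rotate (r * (n - 2))).getD (n - i - 1) none
      = (a :: rest).getD (1 + ((((n : Int) - (i : Int) - 2 - (r : Int)) % ((n : Int) - 1)).toNat)) none := by
    have hsplit : n - i - 1 = (n - i - 2) + 1 := by omega
    rw [hsplit, Nat.add_comm 1 _]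
    simp only [List.getD_cons_succ]
    have ht : n - i - 2 < rest.length := by omega
    have harg : (((n - i - 2 : Nat) : Int) - (r : Int)) = ((n : Int) - (i : Int) - 2 - (r : Int)) := by
      omega
    rw [key (n - i - 2) ht, harg]
  rw [hp1, hp2]

-- the whole loop, rotation count tracked as r
theorem rr_loop_eq (n : Nat) (a : Option Int) (rest : List (Option Int))
    (hn : rest.length = n - 1) (hpos : 0 < rest.length) :
    ∀ (m r : Nat), rrLoop m n (a :: rest.rotate (r * (n - 2))) = (List.range' r m).map (altRound n (a :: rest)) := by
  intro m
  induction m with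
  | zero => intro r; rfl
  | succ m ih =>
    intro r
    rw [rrLoop, List.range'_succ, List.map_cons]
    have hrot : rest.rotate (r * (n - 2)) ≠ [] := by
      intro h
      rw [List.rotate_eq_nil_iff] at h
      subst h
      simp at hpos
    have hstep : rrStep (a :: rest.rotate (r * (n - 2))) = a :: rest.rotate ((r + 1) * (n - 2)) := by
      rw [rr_step_rotate a _ hrot, List.length_rotate, List.rotate_rotate]
      have harg : r * (n - 2) + (rest.length - 1) = (r + 1) * (n - 2) := by
        have h2 : rest.length - 1 = n - 2 := by omega
        rw [h2]; ring
      rw [harg]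
    rw [hstep, ih (r + 1), rr_round_eq n r a rest hn hpos]

-- the shared shape: loop = map over rounds, for any starting list
theorem rr_main (ps : List (Option Int)) :
    rrLoop (ps.length - 1) ps.length ps = (List.range (ps.length - 1)).map (altRound ps.length ps) := by
  cases ps with
  | nil => rfl
  | cons a rest =>
    by_cases hrest : rest = []
    · subst hrest; rfl
    · have hpos : 0 < rest.length := List.length_pos_iff.mpr hrest
      have hn : rest.length = (a :: rest).length - 1 := by simp
      have h0 : rest.rotate (0 * ((a :: rest).length - 2)) = rest := by
        rw [Nat.zero_mul, List.rotate_zero]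
      calc rrLoop ((a :: rest).length - 1) (a :: rest).length (a :: rest)
          = rrLoop ((a :: rest).length - 1) (a :: rest).length (a :: rest.rotate (0 * ((a :: rest).length - 2))) := by rw [h0]
        _ = (List.range' 0 ((a :: rest).length - 1)).map (altRound (a :: rest).length (a :: rest)) :=
            rr_loop_eq (a :: rest).length a rest hn hpos ((a :: rest).length - 1) 0
        _ = (List.range ((a :: rest).length - 1)).map (altRound (a :: rest).length (a :: rest)) := by
            rw [List.range_eq_range']

-- ===== VERDICT (by name: the statement is the Claim_ definition above) =====
theorem RoundRobinGeneration_spec : Claim_equal_RoundRobinGeneration := by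
  intro players _
  unfold Spec_RoundRobinGeneration RoundRobinGeneration RoundRobinGeneration_alt
  exact rr_main _
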